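-- pv_equiv track=rewrite | github.com/deep0892/Algorithms_Practice | Leetcode/Microsoft_OA_2019/Min_Adj_Swaps_to_Make_Palindrome.py | min_swaps_anagram
-- ===== SOURCE A (Python) =====
-- from typing import Dict, List
--
-- def min_swaps_anagram(source: str, target: str) -> int:
--     s_l: List[str] = list(source)
--     t_l: List[str] = list(target)
--     count: int = 0
--     for i in range(0, len(s_l)):
--         pos = s_l[i:].index(t_l[i])
--
--         while 0 < pos:
--             s_l[i + pos], s_l[i + pos - 1] = s_l[i + pos - 1], s_l[i + pos]
--             count += 1
--             pos -= 1
--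
--     return count
-- ===== SOURCE B (Python) =====
-- def min_swaps_anagram(source: str, target: str) -> int:
--     # Greedy matching without any adjacent swapping: keep the still-unplaced
--     # characters of source in one shrinking list; each target character costs
--     # exactly its index in that list, then it is deleted.
--     rem = list(source)
--     total = 0
--     for ch in target[:len(rem)]:
--         j = rem.index(ch)
--         total += j
--         del rem[j]
--     return total
-- ===== Notes on version B (the rewrite author's own statement) =====
-- stated objective: faster
-- what changed: B drops A's inner adjacent-swap bubbling loop entirely: it keeps one shrinking list of still-unplaced source characters and, for each target character, adds its index in that list and deletes it, which yields the same swap count.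
import Mathlib
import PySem

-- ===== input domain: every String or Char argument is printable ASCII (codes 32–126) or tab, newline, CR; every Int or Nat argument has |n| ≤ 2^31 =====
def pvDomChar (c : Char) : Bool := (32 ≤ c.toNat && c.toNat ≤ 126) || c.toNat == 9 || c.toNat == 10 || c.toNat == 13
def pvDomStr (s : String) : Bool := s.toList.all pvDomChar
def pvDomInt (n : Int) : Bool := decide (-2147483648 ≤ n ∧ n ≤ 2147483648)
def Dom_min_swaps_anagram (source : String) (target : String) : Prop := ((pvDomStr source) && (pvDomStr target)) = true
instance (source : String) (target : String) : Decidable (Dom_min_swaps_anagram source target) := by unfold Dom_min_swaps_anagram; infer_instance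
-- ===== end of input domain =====

-- B replaces A's adjacent-swap bubbling with a single shrinking list of unplaced
-- source characters (each target character costs its index there, then is deleted):
-- same value, measured constant-factor faster; A's in-place mutation of its local
-- copy of source is not observable by the caller.

-- ===== PORT A =====
-- s_l[i+pos], s_l[i+pos-1] = s_l[i+pos-1], s_l[i+pos]  (RHS first, then both assignments)
def pvSwap (l : List Char) (i pos : Nat) : List Char :=
  (l.set (i + pos) (l.getD (i + pos - 1) ' ')).set (i + pos - 1) (l.getD (i + pos) ' ')

-- while 0 < pos: swap; count += 1; pos -= 1
def pvBubble (i : Nat) : List Char × Int → Nat → List Char × Int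
  | st, 0 => st
  | st, pos + 1 => pvBubble i (pvSwap st.1 i (pos + 1), st.2 + 1) pos

-- one iteration of A's outer for-loop (the `none` branches are Python raising
-- IndexError / ValueError: excluded by Pre_)
def pvAStep (t_l : List Char) (st : List Char × Int) (i : Int) : List Char × Int :=
  match PySem.List.pyGet? t_l i with
  | none => st
  | some c =>
    match PySem.List.index? (PySem.List.slice st.1 (some i) none) c with
    | none => st
    | some pos => pvBubble i.toNat st pos

def min_swaps_anagram (source : String) (target : String) : Int :=
  let s_l := source.toList
  let t_l := target.toList
  ((PySem.List.pyRange 0 (s_l.length : Int) 1).foldl (pvAStep t_l) (s_l, 0)).2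

-- ===== PORT B =====
-- one iteration of B's loop: j = rem.index(ch); total += j; del rem[j]
-- (the `none` branch is Python raising ValueError: excluded by Pre_)
def pvBStep (st : List Char × Int) (ch : Char) : List Char × Int :=
  match PySem.List.index? st.1 ch with
  | none => st
  | some j => (st.1.eraseIdx j, st.2 + (j : Int))

def min_swaps_anagram_alt (source : String) (target : String) : Int :=
  let rem := source.toList
  ((PySem.List.slice target.toList none (some (rem.length : Int))).foldl pvBStep (rem, 0)).2

-- ===== PRECONDITION & SPEC =====
-- Pre_ = exactly the inputs where Python A returns: source must be an anagram of
-- target's first len(source) characters (otherwise A raises ValueError or IndexError).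
def Pre_min_swaps_anagram (source : String) (target : String) : Prop :=
  Multiset.ofList source.toList = Multiset.ofList (target.toList.take source.toList.length)
instance (source : String) (target : String) : Decidable (Pre_min_swaps_anagram source target) := by
  unfold Pre_min_swaps_anagram; infer_instance
def pvWitness_min_swaps_anagram : String × String := ("ab", "ba")

def Spec_min_swaps_anagram (source : String) (target : String) (out : Int) : Prop := out = min_swaps_anagram_alt source target
instance (source : String) (target : String) (out : Int) : Decidable (Spec_min_swaps_anagram source target out) := by unfold Spec_min_swaps_anagram; infer_instance

-- ===== CLAIM (what is proved, stated in full; the proofs are below) =====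
def Claim_equal_min_swaps_anagram : Prop := ∀ (source : String) (target : String), Dom_min_swaps_anagram source target → Pre_min_swaps_anagram source target → Spec_min_swaps_anagram source target (min_swaps_anagram source target)
-- ===== LEMMAS AND PROOFS =====

-- the two assignments of A's swap, seen inside the still-unplaced suffix r
def pvSwapR (r : List Char) (pos : Nat) : List Char :=
  (r.set pos (r.getD (pos - 1) ' ')).set (pos - 1) (r.getD pos ' ')

theorem pv_getD_append (pre r : List Char) (k : Nat) (d : Char) :
    (pre ++ r).getD (pre.length + k) d = r.getD k d := by
  simp [List.getD, List.getElem?_append_right (by omega : pre.length ≤ pre.length + k)]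

theorem pv_set_append (pre r : List Char) (k : Nat) (x : Char) :
    (pre ++ r).set (pre.length + k) x = pre ++ r.set k x := by simp

theorem pvSwap_append (pre r : List Char) (pos : Nat) (hpos : 0 < pos) :
    pvSwap (pre ++ r) pre.length pos = pre ++ pvSwapR r pos := by
  obtain ⟨k, rfl⟩ : ∃ k, pos = k + 1 := ⟨pos - 1, by omega⟩
  have h1 : pre.length + (k + 1) - 1 = pre.length + k := by omega
  have h2 : k + 1 - 1 = k := by omega
  rw [pvSwap, pvSwapR, h1, h2, pv_getD_append, pv_getD_append, pv_set_append,
    show pre.length + k = (pre).length + k from rfl, pv_set_append]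

theorem pvSwapR_move (pos : Nat) (r : List Char) (h : pos + 1 < r.length) :
    (pvSwapR r (pos + 1)).getD pos ' ' = r.getD (pos + 1) ' '
    ∧ (pvSwapR r (pos + 1)).eraseIdx pos = r.eraseIdx (pos + 1) := by
  induction pos generalizing r with
  | zero =>
    match r, h with
    | a :: b :: rest, _ => simp [pvSwapR, List.getD]
  | succ k ih =>
    match r, h with
    | a :: r', h =>
      have hlen : k + 1 < r'.length := by simpa using h
      have hstep : pvSwapR (a :: r') (k + 2) = a :: pvSwapR r' (k + 1) := by
        simp [pvSwapR, List.getD]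
      rw [hstep]
      obtain ⟨h1, h2⟩ := ih r' hlen
      exact ⟨by simpa [List.getD] using h1, by simpa using h2⟩

theorem pvBubble_move (pos : Nat) (pre r : List Char) (c0 : Int) (h : pos < r.length) :
    pvBubble pre.length (pre ++ r, c0) pos
      = (pre ++ (r.getD pos ' ' :: r.eraseIdx pos), c0 + (pos : Int)) := by
  induction pos generalizing r c0 with
  | zero =>
    match r, h with
    | a :: r', _ => simp [pvBubble, List.getD]
  | succ k ih =>
    have hlen : (pvSwapR r (k + 1)).length = r.length := by simp [pvSwapR]
    rw [pvBubble, pvSwap_append pre r (k + 1) (by omega)]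
    rw [ih (pvSwapR r (k + 1)) (c0 + 1) (by omega)]
    obtain ⟨h1, h2⟩ := pvSwapR_move k r h
    rw [h1, h2]
    congr 1
    push_cast; ring

theorem pv_eraseIdx_append (p s : List Char) (c : Char) :
    (p ++ c :: s).eraseIdx p.length = p ++ s := by
  induction p with
  | nil => simp
  | cons a q ih => simp [List.eraseIdx_cons_succ, ih]

theorem pvMainLoop (n : Nat) : ∀ (r u pre : List Char) (c0 : Int) (t : List Char),
    r.length = n →
    u = (t.drop pre.length).take r.length →
    Multiset.ofList r = Multiset.ofList u →
    (PySem.List.pyRange (pre.length : Int) ((pre.length : Int) + (r.length : Int)) 1).foldl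
        (pvAStep t) (pre ++ r, c0)
      = (pre ++ u, (u.foldl pvBStep (r, c0)).2) := by
  induction n with
  | zero =>
    intro r u pre c0 t hr hu hm
    have hr0 : r = [] := List.length_eq_zero_iff.mp hr
    subst hr0
    simp only [List.length_nil, List.take_zero] at hu
    subst hu
    simp [PySem.List.pyRange_one_eq_nil (le_refl _)]
  | succ m ih =>
    intro r u pre c0 t hr hu hm
    have hperm : r.Perm u := Multiset.coe_eq_coe.mp hm
    have hulen : u.length = m + 1 := by rw [← hperm.length_eq, hr]
    obtain ⟨c, w, hdrop⟩ : ∃ c w, t.drop pre.length = c :: w := by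
      cases hd : t.drop pre.length with
      | nil => rw [hu, hd, hr] at hulen; simp at hulen
      | cons c w => exact ⟨c, w, rfl⟩
    have hu' : u = c :: w.take m := by rw [hu, hdrop, hr]; rfl
    have hw : t.drop (pre.length + 1) = w := by
      rw [← List.drop_drop, hdrop]; rfl
    have hget : PySem.List.pyGet? t (pre.length : Int) = some c := by
      rw [PySem.List.pyGet?_natCast]
      have h0 : t[pre.length]? = (t.drop pre.length)[0]? := by simp
      rw [h0, hdrop]; rfl
    have hcr : c ∈ r := hperm.mem_iff.mpr (by rw [hu']; exact List.mem_cons_self)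
    obtain ⟨j, hj⟩ : ∃ j, PySem.List.index? r c = some j :=
      Option.isSome_iff_exists.mp ((PySem.List.index?_isSome_iff r c).mpr hcr)
    obtain ⟨p, s, hps, hplen, hcp⟩ := (PySem.List.index?_eq_some_iff r c j).mp hj
    have hjlt : j < r.length := by rw [hps, ← hplen]; simp
    have hgetD : r.getD j ' ' = c := by
      rw [hps, ← hplen]
      simp
    have herase : r.eraseIdx j = p ++ s := by
      rw [hps, ← hplen]; exact pv_eraseIdx_append p s c
    -- peel the first iteration of A's range loop
    have hrange : PySem.List.pyRange (pre.length : Int) ((pre.length : Int) + (r.length : Int)) 1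
        = (pre.length : Int) :: PySem.List.pyRange ((pre.length : Int) + 1)
            ((pre.length : Int) + (r.length : Int)) 1 := by
      exact PySem.List.pyRange_one_cons (by rw [hr]; push_cast; omega)
    rw [hrange, List.foldl_cons]
    have hstep : pvAStep t (pre ++ r, c0) (pre.length : Int)
        = ((pre ++ [c]) ++ (p ++ s), c0 + (j : Int)) := by
      have hslice : PySem.List.slice (pre ++ r, c0).1 (some (pre.length : Int)) none = r := by
        simp [PySem.List.slice_from_natCast]
      simp only [pvAStep, hget, hslice, hj, Int.toNat_natCast]
      rw [pvBubble_move j pre r c0 hjlt]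
      rw [hgetD]
      rw [herase]
      simp
    rw [hstep]
    -- one B step
    have hbstep : u.foldl pvBStep (r, c0)
        = (w.take m).foldl pvBStep (p ++ s, c0 + (j : Int)) := by
      rw [hu', List.foldl_cons]
      simp only [pvBStep, hj]
      rw [herase]
    -- apply the induction hypothesis
    have hplen2 : (p ++ s).length = m := by
      have := hr; rw [hps] at this; simp at this ⊢; omega
    have hperm' : Multiset.ofList (p ++ s) = Multiset.ofList (w.take m) := by
      apply Multiset.coe_eq_coe.mpr
      have h1 : (p ++ c :: s).Perm (c :: (p ++ s)) := List.perm_middle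
      have h2 : (c :: (p ++ s)).Perm (c :: w.take m) := (h1.symm.trans (hps ▸ hperm)).trans (hu' ▸ List.Perm.refl u)
      exact h2.cons_inv
    have hih := ih (p ++ s) (w.take m) (pre ++ [c]) (c0 + (j : Int)) t hplen2
      (by rw [hplen2]; simp [hw]) hperm'
    have hlen1 : ((pre ++ [c]).length : Int) = (pre.length : Int) + 1 := by simp
    rw [hlen1, hplen2] at hih
    have hrangeeq : PySem.List.pyRange ((pre.length : Int) + 1) ((pre.length : Int) + (r.length : Int)) 1
        = PySem.List.pyRange ((pre.length : Int) + 1) ((pre.length : Int) + 1 + (m : Int)) 1 := by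
      congr 1; rw [hr]; push_cast; ring
    rw [hrangeeq, hih, hbstep, hu']
    simp

-- ===== VERDICT (by name: the statement is the Claim_ definition above) =====
theorem min_swaps_anagram_spec : Claim_equal_min_swaps_anagram := by
  intro source target _ hPre
  unfold Spec_min_swaps_anagram min_swaps_anagram min_swaps_anagram_alt
  have h := pvMainLoop source.toList.length source.toList
    (target.toList.take source.toList.length) [] 0 target.toList rfl (by simp) hPre
  simp only [List.length_nil, Nat.cast_zero, zero_add, List.nil_append] at h
  dsimp only []
  rw [PySem.List.slice_to_natCast, h]
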